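-- pv_equiv track=rewrite | github.com/miliar/Code_Jam_Webscraper | solutions_python/solutions_year13_round0_nr1/2583.py | getColoumns
-- ===== SOURCE A (Python) =====
-- def getColoumns(s):
--     cols = ['', '', '', '']
--     for row in s.split('\n'):
--         cols[0] = cols[0] + row[0]
--         cols[1] = cols[1] + row[1]
--         cols[2] = cols[2] + row[2]
--         cols[3] = cols[3] + row[3]
--
--     return cols
-- ===== SOURCE B (Python) =====
-- def getColoumns(s):
--     return [''.join(row[i] for row in s.split('\n')) for i in range(4)]
-- ===== Notes on version B (the rewrite author's own statement) =====
-- stated objective: idiomatic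
-- what changed: B builds each column directly with a join over a column-major scan per index (four passes over the rows) instead of A's single row-major pass maintaining four string accumulators by repeated concatenation.
import Mathlib
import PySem

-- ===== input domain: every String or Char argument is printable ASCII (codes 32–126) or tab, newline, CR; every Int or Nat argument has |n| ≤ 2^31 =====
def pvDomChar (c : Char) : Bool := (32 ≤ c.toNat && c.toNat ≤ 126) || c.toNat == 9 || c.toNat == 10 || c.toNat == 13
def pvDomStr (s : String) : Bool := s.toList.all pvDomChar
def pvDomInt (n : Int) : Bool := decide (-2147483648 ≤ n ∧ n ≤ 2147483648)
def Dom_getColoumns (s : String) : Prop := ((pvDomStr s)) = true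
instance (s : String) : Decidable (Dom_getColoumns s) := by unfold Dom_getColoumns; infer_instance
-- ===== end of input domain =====

-- B builds each column with a join over a column-major scan per index, instead of A's
-- single row-major pass with four concatenation accumulators (same cost, more idiomatic).

-- ===== PORT A =====
-- row-major pass: four column accumulators, each row contributes its chars 0..3
def getColoumns (s : String) : List String :=
  let cols := (PySem.Chars.splitOn s.toList ['\n']).foldl
    (fun (c : List Char × List Char × List Char × List Char) row =>
      (c.1 ++ [PySem.List.pyGetD row 0 ' '],
       c.2.1 ++ [PySem.List.pyGetD row 1 ' '],
       c.2.2.1 ++ [PySem.List.pyGetD row 2 ' '],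
       c.2.2.2 ++ [PySem.List.pyGetD row 3 ' ']))
    ([], [], [], [])
  [String.ofList cols.1, String.ofList cols.2.1, String.ofList cols.2.2.1, String.ofList cols.2.2.2]

-- ===== PORT B =====
-- [''.join(row[i] for row in s.split('\n')) for i in range(4)]
def getColoumns_alt (s : String) : List String :=
  (PySem.List.pyRange 0 4 1).map (fun i =>
    String.ofList (PySem.Chars.join []
      ((PySem.Chars.splitOn s.toList ['\n']).map
        (fun row => [PySem.List.pyGetD row i ' ']))))

-- ===== PRECONDITION & SPEC =====
-- Pre_ excludes exactly the inputs where some line has fewer than 4 characters: there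
-- Python A raises IndexError on row[i] (B raises identically).
def Pre_getColoumns (s : String) : Prop :=
  ∀ row ∈ PySem.Chars.splitOn s.toList ['\n'], 4 ≤ row.length
instance (s : String) : Decidable (Pre_getColoumns s) := by unfold Pre_getColoumns; infer_instance

def pvWitness_getColoumns : String := "abcd\nefgh"

def Spec_getColoumns (s : String) (out : List String) : Prop := out = getColoumns_alt s
instance (s : String) (out : List String) : Decidable (Spec_getColoumns s out) := by
  unfold Spec_getColoumns; infer_instance

-- ===== CLAIM (what is proved, stated in full; the proofs are below) =====
def Claim_equal_getColoumns : Prop :=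
  ∀ (s : String), Dom_getColoumns s → Pre_getColoumns s → Spec_getColoumns s (getColoumns s)

-- ===== LEMMAS AND PROOFS =====
lemma getColoumns_loop_eq (rows : List (List Char)) (c0 c1 c2 c3 : List Char) :
    rows.foldl
      (fun (c : List Char × List Char × List Char × List Char) row =>
        (c.1 ++ [PySem.List.pyGetD row 0 ' '],
         c.2.1 ++ [PySem.List.pyGetD row 1 ' '],
         c.2.2.1 ++ [PySem.List.pyGetD row 2 ' '],
         c.2.2.2 ++ [PySem.List.pyGetD row 3 ' ']))
      (c0, c1, c2, c3) =
    (c0 ++ rows.map (fun row => PySem.List.pyGetD row 0 ' '),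
     c1 ++ rows.map (fun row => PySem.List.pyGetD row 1 ' '),
     c2 ++ rows.map (fun row => PySem.List.pyGetD row 2 ' '),
     c3 ++ rows.map (fun row => PySem.List.pyGetD row 3 ' ')) := by
  induction rows generalizing c0 c1 c2 c3 with
  | nil => simp
  | cons r rs ih => simp [List.foldl_cons, ih]

lemma join_singletons_map (rows : List (List Char)) (i : Int) :
    PySem.Chars.join [] (rows.map (fun row => [PySem.List.pyGetD row i ' '])) =
    rows.map (fun row => PySem.List.pyGetD row i ' ') := by
  have h := PySem.Chars.join_nil_singletons (rows.map (fun row => PySem.List.pyGetD row i ' '))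
  simpa [List.map_map, Function.comp] using h

-- ===== VERDICT (by name: the statement is the Claim_ definition above) =====
theorem getColoumns_spec : Claim_equal_getColoumns := by
  intro s _ _
  unfold Spec_getColoumns getColoumns getColoumns_alt
  have hr : PySem.List.pyRange 0 4 1 = [0, 1, 2, 3] := by decide
  rw [hr]
  simp only [List.map_cons, List.map_nil, join_singletons_map,
    getColoumns_loop_eq, List.nil_append]
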